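-- pv_equiv track=rewrite | github.com/isabellarhee/15-112 | week 10/BigORecitation.py | inRoomAtTime
-- ===== SOURCE A (Python) =====
-- def inRoomAtTime(logs, t): #O(n) overall
--     timeDict = {}
--     resultSet = set()
--     for time,name in logs:  #O(n)
--         if time > t:  #O(1)
--             break
--         if name not in timeDict: #O(1)
--             timeDict[name] = True
--         else:
--             timeDict[name] = not timeDict[name]
--     #generate the time dictionary
--     for name in timeDict: #O(n)
--         if timeDict[name]:  #O(1)
--             resultSet.add(name)
--     return resultSet
-- ===== SOURCE B (Python) =====
-- def inRoomAtTime(logs, t):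
--     # Worklist peeling: collect the prefix of names up to time t, then repeatedly
--     # take the first remaining name, decide by one scan whether it occurs an odd
--     # number of times (in room), and delete all its occurrences from the worklist.
--     # No dictionary and no second flag-filtering pass.
--     prefix = []
--     for time, name in logs:
--         if time > t:
--             break
--         prefix.append(name)
--     result = []
--     while prefix:
--         first = prefix[0]
--         rest = prefix[1:]
--         if rest.count(first) % 2 == 0:
--             result.append(first)
--         prefix = [n for n in rest if n != first]
--     return set(result)
-- ===== Notes on version B (the rewrite author's own statement) =====
-- stated objective: alternative
-- what changed: B drops A's per-event parity dict and its second flag-filtering loop for a worklist-peeling algorithm: it repeatedly takes the first remaining name of the collected prefix, decides by one scan of the rest whether that name occurs an odd number of times, and deletes all its occurrences from the worklist before continuing.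
import Mathlib
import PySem

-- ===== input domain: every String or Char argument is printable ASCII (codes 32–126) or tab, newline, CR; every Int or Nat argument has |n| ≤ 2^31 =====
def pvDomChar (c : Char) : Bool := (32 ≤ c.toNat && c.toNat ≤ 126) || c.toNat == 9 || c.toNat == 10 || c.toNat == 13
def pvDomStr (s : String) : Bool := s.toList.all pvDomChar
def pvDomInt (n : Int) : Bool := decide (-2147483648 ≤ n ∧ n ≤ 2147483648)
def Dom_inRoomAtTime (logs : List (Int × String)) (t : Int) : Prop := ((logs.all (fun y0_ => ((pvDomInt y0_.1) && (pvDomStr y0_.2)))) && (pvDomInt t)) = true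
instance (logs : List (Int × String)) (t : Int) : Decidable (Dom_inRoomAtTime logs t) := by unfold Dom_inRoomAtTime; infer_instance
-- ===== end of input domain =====

-- B replaces A's per-event boolean-toggle dict and second flag-filtering loop by worklist
-- peeling: take the first remaining name, one parity scan, delete its occurrences (alternative; not faster).


-- ===== PORT A =====
-- first loop of A: build timeDict, breaking at the first time > t
def inRoomAtTimeLoopA (t : Int) : List (Int × String) → PySem.Dict String Bool → PySem.Dict String Bool
  | [], d => d
  | (time, name) :: rest, d =>
    if time > t then d
    else inRoomAtTimeLoopA t rest
      (if d.contains name = false then d.insert name true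
       else d.insert name (!(d.getD name false)))

def inRoomAtTime (logs : List (Int × String)) (t : Int) : List String :=
  let timeDict := inRoomAtTimeLoopA t logs PySem.Dict.empty
  -- second loop of A: for name in timeDict: if timeDict[name]: resultSet.add(name)
  (PySem.Dict.keys timeDict).foldl
    (fun s name => if timeDict.getD name false then PySem.Set.add s name else s)
    PySem.Set.empty

-- ===== PORT B =====
-- B's prefix collection loop (same break condition, accumulates the names)
def inRoomAtTimeNamesB (t : Int) : List (Int × String) → List String → List String
  | [], acc => acc
  | (time, name) :: rest, acc =>
    if time > t then acc else inRoomAtTimeNamesB t rest (acc ++ [name])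

-- B's while loop: peel the first remaining name, one parity scan of the rest,
-- delete all its occurrences from the worklist
def solveB : List String → List String → List String
  | acc, [] => acc
  | acc, first :: rest =>
    solveB
      (if PySem.Int.mod (PySem.List.count rest first : Int) 2 == 0 then acc ++ [first] else acc)
      (rest.filter (fun n => !(n == first)))
termination_by _ l => l.length
decreasing_by
  simp
  exact le_trans (List.length_filter_le _ _) (by simp)

def inRoomAtTime_alt (logs : List (Int × String)) (t : Int) : List String :=
  let prefixNames := inRoomAtTimeNamesB t logs []
  PySem.Set.ofList (solveB [] prefixNames)

-- ===== PRECONDITION & SPEC =====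
def Spec_inRoomAtTime (logs : List (Int × String)) (t : Int) (out : List String) : Prop := out = inRoomAtTime_alt logs t
instance (logs : List (Int × String)) (t : Int) (out : List String) : Decidable (Spec_inRoomAtTime logs t out) := by unfold Spec_inRoomAtTime; infer_instance

-- ===== CLAIM (what is proved, stated in full; the proofs are below) =====
def Claim_equal_inRoomAtTime : Prop := ∀ (logs : List (Int × String)) (t : Int), Dom_inRoomAtTime logs t → Spec_inRoomAtTime logs t (inRoomAtTime logs t)

-- ===== LEMMAS AND PROOFS =====

-- A's step inserts under either branch: one insert with a value function
def dictStepA (d : PySem.Dict String Bool) (name : String) : PySem.Dict String Bool :=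
  d.insert name (if d.contains name then !(d.getD name false) else true)

theorem dictStepA_eq (d : PySem.Dict String Bool) (name : String) :
    (if d.contains name = false then d.insert name true
     else d.insert name (!(d.getD name false))) = dictStepA d name := by
  unfold dictStepA
  cases h : d.contains name <;> simp

-- B's accumulator loop appends to the front accumulator
theorem namesB_acc (t : Int) (logs : List (Int × String)) (acc : List String) :
    inRoomAtTimeNamesB t logs acc = acc ++ inRoomAtTimeNamesB t logs [] := by
  induction logs generalizing acc with
  | nil => simp [inRoomAtTimeNamesB]
  | cons p rest ih =>
    obtain ⟨time, name⟩ := p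
    by_cases h : time > t
    · simp [inRoomAtTimeNamesB, h]
    · rw [inRoomAtTimeNamesB, inRoomAtTimeNamesB]
      simp only [if_neg h, List.nil_append]
      rw [ih (acc ++ [name]), ih [name]]
      simp

-- fusion: A's dict loop is a fold of dictStepA over B's collected names
theorem loopA_eq_foldl (t : Int) (logs : List (Int × String)) (d : PySem.Dict String Bool) :
    inRoomAtTimeLoopA t logs d = (inRoomAtTimeNamesB t logs []).foldl dictStepA d := by
  induction logs generalizing d with
  | nil => simp [inRoomAtTimeLoopA, inRoomAtTimeNamesB]
  | cons p rest ih =>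
    obtain ⟨time, name⟩ := p
    by_cases h : time > t
    · simp [inRoomAtTimeLoopA, inRoomAtTimeNamesB, h]
    · rw [inRoomAtTimeLoopA, inRoomAtTimeNamesB]
      simp only [if_neg h, List.nil_append]
      rw [dictStepA_eq, ih, namesB_acc t rest [name]]
      simp

-- parity of an Int count vs appending one occurrence
theorem parity_succ (c : Nat) :
    (PySem.Int.mod ((c : Int) + 1) 2 == 1) = !(PySem.Int.mod (c : Int) 2 == 1) := by
  have h1 : PySem.Int.mod ((c : Int) + 1) 2 = ((c : Int) + 1) % 2 := by
    simp [PySem.Int.mod, Int.fmod_eq_emod]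
  have h2 : PySem.Int.mod ((c : Int)) 2 = (c : Int) % 2 := by
    simp [PySem.Int.mod, Int.fmod_eq_emod]
  rw [h1, h2]
  rcases Int.emod_two_eq_zero_or_one c with h | h <;> simp [h] <;> omega

-- keys of the built dict are the dedup of the names
theorem keys_foldl_dictStepA (ns : List String) :
    (ns.foldl dictStepA PySem.Dict.empty).keys = PySem.List.dedup ns := by
  unfold dictStepA
  rw [PySem.Dict.keys_foldl_insert]
  simp [PySem.Set.update_nil_left]

-- the dict built from a name list: getD is the parity of the count
theorem getD_foldl_dictStepA (ns : List String) (n : String) :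
    ((ns.foldl dictStepA PySem.Dict.empty).getD n false)
      = (PySem.Int.mod ((ns.count n : Int)) 2 == 1) := by
  induction ns using List.reverseRecOn with
  | nil => simp [PySem.Dict.getD_empty]
  | append_singleton ns x ih =>
    rw [List.foldl_append, List.foldl_cons, List.foldl_nil]
    set D := ns.foldl dictStepA PySem.Dict.empty with hD
    have hcont : D.contains x = true ↔ x ∈ ns := by
      rw [PySem.Dict.contains_iff_mem_keys, keys_foldl_dictStepA, PySem.List.mem_dedup]
    unfold dictStepA
    rw [PySem.Dict.getD_insert]
    by_cases hnx : n = x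
    · subst hnx
      rw [if_pos rfl]
      by_cases hmem : n ∈ ns
      · rw [if_pos (hcont.mpr hmem), ih, List.count_append, ← parity_succ]
        have hone : List.count n [n] = 1 := by simp
        rw [hone]
        push_cast
        rw [Int.add_comm]
      · have : D.contains n = false := by
          cases h : D.contains n
          · rfl
          · exact absurd (hcont.mp h) hmem
        rw [if_neg (by simp [this])]
        have hc : List.count n ns = 0 := List.count_eq_zero.mpr hmem
        have hone : List.count n [n] = 1 := by simp
        rw [List.count_append, hc, hone]
        simp [PySem.Int.mod]
    · rw [if_neg hnx, ih, List.count_append]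
      have hz : List.count n [x] = 0 := by
        rw [List.count_eq_zero]
        simp [hnx]
      rw [hz]
      simp

-- collecting an if-add fold over a Nodup list is filtering it
theorem foldl_add_if_filter (p : String → Bool) (ks : List String) (h : ks.Nodup) :
    ks.foldl (fun s n => if p n then PySem.Set.add s n else s) PySem.Set.empty
      = ks.filter p := by
  induction ks using List.reverseRecOn with
  | nil => rfl
  | append_singleton ks x ih =>
    have hnd : ks.Nodup := (List.nodup_append.mp h).1
    have hx : x ∉ ks := by
      have h2 : (x :: ks).Nodup := ((List.perm_append_singleton x ks).nodup_iff).mp h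
      exact (List.nodup_cons.mp h2).1
    rw [List.foldl_append, List.foldl_cons, List.foldl_nil, ih hnd, List.filter_append]
    by_cases hp : p x
    · rw [if_pos hp]
      rw [PySem.Set.add_of_not_mem (by simp [hx, List.mem_filter])]
      simp [hp]
    · simp [hp]

-- B-side: foldl Set.add ignores elements already present in the accumulator
theorem foldl_add_filter_out (x : String) :
    ∀ (l : List String) (s : List String), x ∈ s →
      l.foldl PySem.Set.add s = (l.filter (fun n => !(n == x))).foldl PySem.Set.add s := by
  intro l
  induction l with
  | nil => intro s _; rfl
  | cons y l ih =>
    intro s hx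
    by_cases hyx : y = x
    · subst hyx
      have : PySem.Set.add s y = s := PySem.Set.add_of_mem hx
      simp [this, ih s hx]
    · have hmem : x ∈ PySem.Set.add s y := by
        simp [PySem.Set.mem_add, hx]
      simp [hyx, ih (PySem.Set.add s y) hmem]

-- pushing a fresh head through foldl Set.add
theorem foldl_add_cons_head (x : String) :
    ∀ (l : List String) (s : List String), (∀ n ∈ l, n ≠ x) →
      l.foldl PySem.Set.add (x :: s) = x :: l.foldl PySem.Set.add s := by
  intro l
  induction l with
  | nil => intro s _; rfl
  | cons y l ih =>
    intro s h
    have hyx : y ≠ x := h y (List.mem_cons_self)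
    have hadd : PySem.Set.add (x :: s) y = x :: PySem.Set.add s y := by
      simp [PySem.Set.add, PySem.Set.contains, hyx]
      split <;> rfl
    rw [List.foldl_cons, hadd, List.foldl_cons]
    exact ih (PySem.Set.add s y) (fun n hn => h n (List.mem_cons_of_mem y hn))

-- dedup of a cons: head, then dedup of the tail with the head's occurrences removed
theorem dedup_cons_filter (x : String) (l : List String) :
    PySem.List.dedup (x :: l) = x :: PySem.List.dedup (l.filter (fun n => !(n == x))) := by
  have h1 : PySem.List.dedup (x :: l) = (x :: l).foldl PySem.Set.add [] := by
    rw [PySem.List.dedup_eq_ofList, PySem.Set.ofList_eq_foldl]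
  have h2 : PySem.List.dedup (l.filter (fun n => !(n == x)))
      = (l.filter (fun n => !(n == x))).foldl PySem.Set.add [] := by
    rw [PySem.List.dedup_eq_ofList, PySem.Set.ofList_eq_foldl]
  rw [h1, h2, List.foldl_cons]
  have hadd : PySem.Set.add ([] : List String) x = [x] := rfl
  rw [hadd, foldl_add_filter_out x l [x] (List.mem_singleton.mpr rfl)]
  exact foldl_add_cons_head x _ [] (by
    intro n hn
    have := (List.mem_filter.mp hn).2
    simpa using this)

-- the parity branch condition of B at the head element
theorem parity_head (c : Nat) :
    (PySem.Int.mod ((c : Int)) 2 == 0) = (PySem.Int.mod (((c + 1 : Nat) : Int)) 2 == 1) := by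
  push_cast
  rw [parity_succ]
  have h2 : PySem.Int.mod ((c : Int)) 2 = (c : Int) % 2 := by
    simp [PySem.Int.mod, Int.fmod_eq_emod]
  rw [h2]
  rcases Int.emod_two_eq_zero_or_one c with h | h <;> simp [h]

-- B's while loop computes the odd-count names of the worklist, in first-occurrence order
theorem solveB_eq (l : List String) : ∀ (acc : List String),
    solveB acc l = acc ++ (PySem.List.dedup l).filter
      (fun n => PySem.Int.mod ((l.count n : Int)) 2 == 1) := by
  match l with
  | [] => intro acc; simp [solveB]
  | first :: rest =>
    intro acc
    rw [solveB]
    rw [solveB_eq (rest.filter (fun n => !(n == first)))]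
    set rem := rest.filter (fun n => !(n == first)) with hrem
    rw [dedup_cons_filter, ← hrem, List.filter_cons]
    have hcount : PySem.List.count rest first = rest.count first := by
      simp [PySem.List.count_eq]
    have hhead : ((first :: rest).count first : Int) = ((rest.count first + 1 : Nat) : Int) := by
      rw [List.count_cons_self]
    have hcond : (PySem.Int.mod ((PySem.List.count rest first : Nat) : Int) 2 == 0)
        = (PySem.Int.mod (((first :: rest).count first : Int)) 2 == 1) := by
      rw [hcount, hhead]
      exact parity_head _
    have hcongr : (PySem.List.dedup rem).filter
          (fun n => PySem.Int.mod ((rem.count n : Int)) 2 == 1)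
        = (PySem.List.dedup rem).filter
          (fun n => PySem.Int.mod (((first :: rest).count n : Int)) 2 == 1) := by
      apply List.filter_congr
      intro n hn
      have hnrem : n ∈ rem := by rwa [PySem.List.mem_dedup] at hn
      have hne : n ≠ first := by
        have := (List.mem_filter.mp hnrem).2
        simpa using this
      have hc1 : rem.count n = rest.count n := by
        rw [hrem]
        rw [List.count_filter]
        simp [hne]
      have hc2 : (first :: rest).count n = rest.count n := by
        simp [List.count_cons]
        exact fun h => hne h.symm
      rw [hc1, hc2]
    rw [hcongr]
    by_cases hb : (PySem.Int.mod ((PySem.List.count rest first : Nat) : Int) 2 == 0) = true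
    · have hb2 : (PySem.Int.mod (((first :: rest).count first : Int)) 2 == 1) = true := hcond ▸ hb
      rw [if_pos hb, if_pos hb2]
      simp
    · have hb2 : ¬ (PySem.Int.mod (((first :: rest).count first : Int)) 2 == 1) = true := by
        rw [← hcond]; exact hb
      rw [if_neg hb, if_neg hb2]
termination_by l.length
decreasing_by
  simp
  exact List.length_filter_le _ _

-- ===== VERDICT (by name: the statement is the Claim_ definition above) =====
theorem inRoomAtTime_spec : Claim_equal_inRoomAtTime := by
  intro logs t _
  unfold Spec_inRoomAtTime
  simp only [inRoomAtTime, inRoomAtTime_alt]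
  rw [loopA_eq_foldl]
  set ns := inRoomAtTimeNamesB t logs [] with hns
  rw [keys_foldl_dictStepA]
  rw [foldl_add_if_filter _ _ (PySem.List.nodup_dedup ns)]
  rw [solveB_eq ns []]
  rw [List.nil_append]
  rw [PySem.Set.ofList_eq_self_of_nodup]
  · apply List.filter_congr
    intro n _
    rw [getD_foldl_dictStepA]
  · exact List.Nodup.filter _ (PySem.List.nodup_dedup ns)
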